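-- pv_equiv track=rewrite | github.com/klementtan/CS3203 | Team34/Tests34/result_parser.py | get_dupes
-- ===== SOURCE A (Python) =====
-- def get_dupes(xs):
-- 	dupes = set()
-- 	uniq = set()
-- 	for x in xs:
-- 		if x in uniq:
-- 			dupes.add(x)
-- 		else:
-- 			uniq.add(x)
-- 	return dupes
-- ===== SOURCE B (Python) =====
-- def get_dupes(xs):
-- 	rest = list(xs)
-- 	for x in dict.fromkeys(rest):
-- 		rest.remove(x)
-- 	return set(rest)
-- ===== Notes on version B (the rewrite author's own statement) =====
-- stated objective: alternative
-- what changed: Instead of a single pass with seen/dupes sets, B subtracts one occurrence of each distinct element from the list (dict.fromkeys + list.remove) and returns the set of the leftover occurrences.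
import Mathlib
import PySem

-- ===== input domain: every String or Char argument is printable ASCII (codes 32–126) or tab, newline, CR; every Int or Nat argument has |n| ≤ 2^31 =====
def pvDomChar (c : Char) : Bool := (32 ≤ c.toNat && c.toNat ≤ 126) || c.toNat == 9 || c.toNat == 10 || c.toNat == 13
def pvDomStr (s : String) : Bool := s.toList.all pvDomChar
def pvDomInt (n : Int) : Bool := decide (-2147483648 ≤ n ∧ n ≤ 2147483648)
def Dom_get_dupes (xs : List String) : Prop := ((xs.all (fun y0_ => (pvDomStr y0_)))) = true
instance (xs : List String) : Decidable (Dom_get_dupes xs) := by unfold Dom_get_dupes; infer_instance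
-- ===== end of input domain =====

-- B replaces A's single-pass seen/dupes bookkeeping with a multiset-subtraction decomposition:
-- delete the first occurrence of each distinct element from a copy of the list, then the
-- leftovers are exactly the duplicate occurrences and set() of them is the answer (alternative, not faster).

-- ===== PORT A =====
-- for x in xs: if x in uniq: dupes.add(x) else: uniq.add(x); return dupes
def get_dupes (xs : List String) : List String :=
  (xs.foldl
    (fun (st : PySem.Set String × PySem.Set String) x =>
      if PySem.Set.contains st.2 x then (PySem.Set.add st.1 x, st.2)
      else (st.1, PySem.Set.add st.2 x))
    (PySem.Set.empty, PySem.Set.empty)).1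

-- ===== PORT B =====
-- rest = list(xs); for x in dict.fromkeys(rest): rest.remove(x); return set(rest)
-- rest.remove(x): each x removed is still present (the distinct elements are removed once each),
-- so PySem.List.remove? never returns none here; .getD rest only makes the step total.
def get_dupes_alt (xs : List String) : List String :=
  let rest :=
    (PySem.List.dedup xs).foldl
      (fun (rest : List String) x => (PySem.List.remove? rest x).getD rest) xs
  PySem.Set.ofList rest

-- ===== PRECONDITION & SPEC =====
def Spec_get_dupes (xs : List String) (out : List String) : Prop := out = get_dupes_alt xs
instance (xs : List String) (out : List String) : Decidable (Spec_get_dupes xs out) := by unfold Spec_get_dupes; infer_instance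

-- ===== CLAIM (what is proved, stated in full; the proofs are below) =====
def Claim_equal_get_dupes : Prop := ∀ (xs : List String), Dom_get_dupes xs → Spec_get_dupes xs (get_dupes xs)

-- ===== LEMMAS AND PROOFS =====

-- the non-first occurrences of xs, given that the elements of `seen` were already seen
def pvNF (seen : List String) : List String → List String
  | [] => []
  | x :: t => if x ∈ seen then x :: pvNF seen t else pvNF (seen ++ [x]) t

-- the new distinct elements of xs (first occurrences), given `seen`
def pvD (seen : List String) : List String → List String
  | [] => []
  | x :: t => if x ∈ seen then pvD seen t else x :: pvD (seen ++ [x]) t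

theorem pvD_not_mem_seen (xs : List String) : ∀ (seen : List String),
    ∀ y ∈ pvD seen xs, y ∉ seen := by
  induction xs with
  | nil => intro seen y hy; simp [pvD] at hy
  | cons x t ih =>
    intro seen y hy
    by_cases hx : x ∈ seen
    · exact ih seen y (by simpa [pvD, hx] using hy)
    · rcases (by simpa [pvD, hx] using hy : y = x ∨ y ∈ pvD (seen ++ [x]) t) with h | h
      · simpa [h] using hx
      · intro hmem; exact ih (seen ++ [x]) y h (by simp [hmem])

theorem pv_dedup_eq_pvD (xs : List String) : ∀ (seen : List String),
    xs.foldl PySem.Set.add seen = seen ++ pvD seen xs := by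
  induction xs with
  | nil => intro seen; simp [pvD]
  | cons x t ih =>
    intro seen
    by_cases hx : x ∈ seen
    · simp [pvD, hx, ih]
    · simp [pvD, hx, ih]

-- A's dupes set equals set() folded over the non-first occurrences
theorem pvA_eq (xs : List String) : ∀ (seen d : List String),
    (xs.foldl
      (fun (st : PySem.Set String × PySem.Set String) x =>
        if PySem.Set.contains st.2 x then (PySem.Set.add st.1 x, st.2)
        else (st.1, PySem.Set.add st.2 x))
      (d, seen)).1
    = (pvNF seen xs).foldl PySem.Set.add d := by
  induction xs with
  | nil => intro seen d; simp [pvNF]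
  | cons x t ih =>
    intro seen d
    by_cases hx : x ∈ seen
    · simpa [pvNF, hx, PySem.Set.contains, PySem.Set.add_of_mem hx] using ih seen (PySem.Set.add d x)
    · simpa [pvNF, hx, PySem.Set.contains, PySem.Set.add_of_not_mem hx] using ih (seen ++ [x]) d

theorem pv_rm_cons (ys : List String) (x : String) :
    ∀ (init : List String), (∀ y ∈ ys, y ≠ x) →
    ys.foldl (fun (rest : List String) y => (PySem.List.remove? rest y).getD rest) (x :: init)
    = x :: ys.foldl (fun (rest : List String) y => (PySem.List.remove? rest y).getD rest) init := by
  induction ys with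
  | nil => intro init _; simp
  | cons y ys ih =>
    intro init h
    have hyx : x ≠ y := fun e => h y (by simp) e.symm
    have hstep : (PySem.List.remove? (x :: init) y).getD (x :: init)
        = x :: (PySem.List.remove? init y).getD init := by
      rw [PySem.List.remove?_cons_of_ne init hyx]
      cases PySem.List.remove? init y <;> simp
    simp only [List.foldl_cons, hstep]
    exact ih _ (fun z hz => h z (by simp [hz]))

-- B's removal loop leaves exactly the non-first occurrences
theorem pvB_rest_eq (xs : List String) : ∀ (seen : List String),
    (pvD seen xs).foldl
      (fun (rest : List String) y => (PySem.List.remove? rest y).getD rest) xs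
    = pvNF seen xs := by
  induction xs with
  | nil => intro seen; simp [pvD, pvNF]
  | cons x t ih =>
    intro seen
    by_cases hx : x ∈ seen
    · have hne : ∀ y ∈ pvD seen t, y ≠ x := fun y hy e =>
        pvD_not_mem_seen t seen y hy (e ▸ hx)
      simp only [pvD, pvNF, if_pos hx]
      rw [pv_rm_cons _ _ _ hne, ih seen]
    · simp only [pvD, pvNF, if_neg hx, List.foldl_cons,
        PySem.List.remove?_cons_self, Option.getD_some]
      exact ih (seen ++ [x])

-- ===== VERDICT (by name: the statement is the Claim_ definition above) =====
theorem get_dupes_spec : Claim_equal_get_dupes := by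
  intro xs _
  unfold Spec_get_dupes get_dupes get_dupes_alt
  have hd : PySem.List.dedup xs = pvD [] xs := by
    simpa [PySem.Set.ofList_eq_foldl] using pv_dedup_eq_pvD xs []
  rw [hd, pvB_rest_eq xs []]
  have hb : PySem.Set.ofList (pvNF [] xs) = (pvNF [] xs).foldl PySem.Set.add [] := by
    simp [PySem.Set.ofList_eq_foldl]
  rw [hb]
  simpa [PySem.Set.empty] using pvA_eq xs [] []
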